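-- pv_equiv track=rewrite | github.com/DylanGustafson/Wikibot | wikibot.py | stylize_text
-- ===== SOURCE A (Python) =====
-- def stylize_text(text, style_name):
--     #syntax:  "style name":        [(0-9) , (A-Z) , (a-z) , [(exceptions initial)], [(exceptions final)]]
--     styles = {"bold sans":         [120764, 120211, 120205],
--               "italic sans":       [     0, 120263, 120257],
--               "bold italic sans":  [120764, 120315, 120309],
--               "bold serif":        [120734, 119743, 119737],
--               "italic serif":      [     0, 119795, 119789, [104], [8462]],
--               "bold italic serif": [120734, 119847, 119841],
--               "doublestruck":      [120744, 120055, 120049, [67, 72, 78, 80, 81, 82, 90], [8450, 8461, 8469, 8473, 8474, 8477, 8484]]}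
--
--     #Load offset values based on style name
--     offsets = styles[style_name]
--
--     #Loop through each character and replace alphanumeric chars with stylized symbols
--     new_text = ""
--     for i in text:
--         id = ord(i)
--         if len(offsets) > 3 and id in offsets[3]:  #exceptions that cannot be found using a simple offset
--             id = offsets[4][offsets[3].index(id)]
--         elif id >= 48 and id <= 57:                # 0-9
--             id += offsets[0]
--         elif id >= 65 and id <= 90:                # A-Z
--             id += offsets[1]
--         elif id >= 97 and id <= 122:               # a-z
--             id += offsets[2]
--         new_text += chr(id)
--
--     return new_text
-- ===== SOURCE B (Python) =====
-- def stylize_text(text, style_name):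
--     styles = {"bold sans":         [120764, 120211, 120205],
--               "italic sans":       [     0, 120263, 120257],
--               "bold italic sans":  [120764, 120315, 120309],
--               "bold serif":        [120734, 119743, 119737],
--               "italic serif":      [     0, 119795, 119789, [104], [8462]],
--               "bold italic serif": [120734, 119847, 119841],
--               "doublestruck":      [120744, 120055, 120049, [67, 72, 78, 80, 81, 82, 90], [8450, 8461, 8469, 8473, 8474, 8477, 8484]]}
--     offs = styles[style_name]
--     table = {}
--     if offs[0] != 0:
--         for c in range(48, 58):
--             table[c] = c + offs[0]
--     for c in range(65, 91):
--         table[c] = c + offs[1]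
--     for c in range(97, 123):
--         table[c] = c + offs[2]
--     if len(offs) > 3:
--         table.update(zip(offs[3], offs[4]))
--     return text.translate(table)
-- ===== Notes on version B (the rewrite author's own statement) =====
-- stated objective: idiomatic
-- what changed: B precomputes a codepoint->codepoint translation table once (range entries, then exception pairs overriding them) and applies it in a single str.translate pass, instead of A's per-character branch chain with an exception-list membership test and list.index inside the loop.
import Mathlib
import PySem

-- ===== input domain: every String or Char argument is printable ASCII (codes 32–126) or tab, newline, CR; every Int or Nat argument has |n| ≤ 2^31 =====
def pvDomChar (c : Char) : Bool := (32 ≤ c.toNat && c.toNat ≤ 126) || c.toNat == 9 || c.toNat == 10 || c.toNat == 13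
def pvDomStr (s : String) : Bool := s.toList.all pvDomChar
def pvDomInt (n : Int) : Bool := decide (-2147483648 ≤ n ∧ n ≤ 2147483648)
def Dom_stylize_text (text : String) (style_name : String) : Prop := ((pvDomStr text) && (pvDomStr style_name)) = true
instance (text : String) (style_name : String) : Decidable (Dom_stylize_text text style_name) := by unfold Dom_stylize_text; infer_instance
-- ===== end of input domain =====

-- B builds a translation table once and maps every character through it, instead of A's
-- per-character branch chain with exception-list scans; equivalence is on the return value only.

-- ===== PORT A =====
-- a style entry is (digit offset, upper offset, lower offset, optional (exception initials, exception finals));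
-- the Option models Python's 3- vs 5-element heterogeneous lists ('len(offsets) > 3').
abbrev pvStyleT : Type := Int × Int × Int × Option (List Int × List Int)

def pvStylesA : PySem.Dict String pvStyleT :=
  PySem.Dict.ofList
    [("bold sans",         (120764, 120211, 120205, none)),
     ("italic sans",       (0,      120263, 120257, none)),
     ("bold italic sans",  (120764, 120315, 120309, none)),
     ("bold serif",        (120734, 119743, 119737, none)),
     ("italic serif",      (0,      119795, 119789, some ([104], [8462]))),
     ("bold italic serif", (120734, 119847, 119841, none)),
     ("doublestruck",      (120744, 120055, 120049, some ([67, 72, 78, 80, 81, 82, 90], [8450, 8461, 8469, 8473, 8474, 8477, 8484])))]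

-- the branch chain of A's loop body, on the codepoint
def pvCharA (o : pvStyleT) (id : Int) : Int :=
  if (match o.2.2.2 with | some (inits, _) => inits.contains id | none => false) then
    -- offsets[4][offsets[3].index(id)]; index is found (contains just held) and in range for every table entry
    (match o.2.2.2 with
     | some (inits, finals) => ((PySem.List.index? inits id).bind (fun j => PySem.List.pyGet? finals (j : Int))).getD id
     | none => id)
  else if 48 ≤ id ∧ id ≤ 57 then id + o.1
  else if 65 ≤ id ∧ id ≤ 90 then id + o.2.1
  else if 97 ≤ id ∧ id ≤ 122 then id + o.2.2.1
  else id

def stylize_text (text : String) (style_name : String) : String :=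
  match pvStylesA.get? style_name with
  | none => ""   -- Python raises KeyError here; excluded by Pre_
  | some offsets =>
    text.toList.foldl (fun new_text i => new_text.push (Char.ofNat (pvCharA offsets i.toNat).toNat)) ""

-- ===== PORT B =====
def pvStylesB : PySem.Dict String pvStyleT :=
  PySem.Dict.ofList
    [("bold sans",         (120764, 120211, 120205, none)),
     ("italic sans",       (0,      120263, 120257, none)),
     ("bold italic sans",  (120764, 120315, 120309, none)),
     ("bold serif",        (120734, 119743, 119737, none)),
     ("italic serif",      (0,      119795, 119789, some ([104], [8462]))),
     ("bold italic serif", (120734, 119847, 119841, none)),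
     ("doublestruck",      (120744, 120055, 120049, some ([67, 72, 78, 80, 81, 82, 90], [8450, 8461, 8469, 8473, 8474, 8477, 8484])))]

-- build the translation table: range entries, then exception pairs overriding them
def pvTableB (o : pvStyleT) : PySem.Dict Int Int :=
  let t : PySem.Dict Int Int := PySem.Dict.ofList []
  let t := if o.1 ≠ 0 then (PySem.List.pyRange 48 58 1).foldl (fun d c => d.insert c (c + o.1)) t else t
  let t := (PySem.List.pyRange 65 91 1).foldl (fun d c => d.insert c (c + o.2.1)) t
  let t := (PySem.List.pyRange 97 123 1).foldl (fun d c => d.insert c (c + o.2.2.1)) t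
  match o.2.2.2 with
  | some (inits, finals) => (inits.zip finals).foldl (fun d p => d.insert p.1 p.2) t
  | none => t

def stylize_text_alt (text : String) (style_name : String) : String :=
  match pvStylesB.get? style_name with
  | none => ""   -- Python raises KeyError here; excluded by Pre_
  | some o =>
    let t := pvTableB o
    -- str.translate: mapped codepoints replaced, everything else unchanged
    String.ofList (text.toList.map (fun c => Char.ofNat (t.getD (c.toNat : Int) (c.toNat : Int)).toNat))

-- ===== PRECONDITION & SPEC =====
-- Pre_ excludes exactly the unknown style names, on which Python A raises KeyError.
def Pre_stylize_text (text : String) (style_name : String) : Prop :=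
  style_name ∈ ["bold sans", "italic sans", "bold italic sans", "bold serif",
                "italic serif", "bold italic serif", "doublestruck"]
instance (text : String) (style_name : String) : Decidable (Pre_stylize_text text style_name) := by
  unfold Pre_stylize_text; infer_instance

def pvWitness_stylize_text : String × String := ("Hello 123", "doublestruck")

def Spec_stylize_text (text : String) (style_name : String) (out : String) : Prop := out = stylize_text_alt text style_name
instance (text : String) (style_name : String) (out : String) : Decidable (Spec_stylize_text text style_name out) := by unfold Spec_stylize_text; infer_instance

-- ===== CLAIM (what is proved, stated in full; the proofs are below) =====
def Claim_equal_stylize_text : Prop := ∀ (text : String) (style_name : String), Dom_stylize_text text style_name → Pre_stylize_text text style_name → Spec_stylize_text text style_name (stylize_text text style_name)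

-- ===== LEMMAS AND PROOFS =====
theorem pv_foldl_push (f : Char → Char) (l : List Char) (s : String) :
    l.foldl (fun a c => a.push (f c)) s = s ++ String.ofList (l.map f) := by
  induction l generalizing s with
  | nil => simp
  | cons c t ih =>
    simp only [List.foldl_cons, ih, List.map_cons]
    apply String.toList_injective
    simp

-- per-style, per-codepoint agreement of the two loop bodies on the ASCII domain
set_option maxRecDepth 100000 in
theorem pv_char_eq (o : pvStyleT) (ho : o ∈ pvStylesA.values)
    (n : Nat) (hn : n ≤ 126) :
    pvCharA o (n : Int) = (pvTableB o).getD (n : Int) (n : Int) := by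
  have h : ∀ m ∈ List.range 127, ∀ p ∈ pvStylesA.values,
      pvCharA p (m : Int) = (pvTableB p).getD (m : Int) (m : Int) := by decide
  exact h n (List.mem_range.mpr (Nat.lt_succ_of_le hn)) o ho

theorem pv_dom_le (c : Char) (h : pvDomChar c = true) : c.toNat ≤ 126 := by
  unfold pvDomChar at h
  simp only [Bool.or_eq_true, Bool.and_eq_true, decide_eq_true_eq, beq_iff_eq] at h
  omega

theorem pv_main (o : pvStyleT) (ho : o ∈ pvStylesA.values) (l : List Char)
    (hl : l.all pvDomChar = true) :
    l.foldl (fun a i => a.push (Char.ofNat (pvCharA o (i.toNat : Int)).toNat)) "" =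
      String.ofList (l.map fun c => Char.ofNat (((pvTableB o).getD (c.toNat : Int) (c.toNat : Int)).toNat)) := by
  rw [pv_foldl_push (fun c => Char.ofNat (pvCharA o (c.toNat : Int)).toNat) l ""]
  have : ("" : String) ++ String.ofList (l.map fun c => Char.ofNat (pvCharA o (c.toNat : Int)).toNat)
      = String.ofList (l.map fun c => Char.ofNat (pvCharA o (c.toNat : Int)).toNat) := by
    apply String.toList_injective; simp
  rw [this]
  congr 1
  apply List.map_congr_left
  intro c hc
  rw [pv_char_eq o ho c.toNat (pv_dom_le c (by
    rw [List.all_eq_true] at hl; exact hl c hc))]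

-- ===== VERDICT (by name: the statement is the Claim_ definition above) =====
theorem stylize_text_spec : Claim_equal_stylize_text := by
  intro text style_name hdom hpre
  unfold Spec_stylize_text
  have hd : text.toList.all pvDomChar = true := by
    unfold Dom_stylize_text pvDomStr at hdom
    exact (Bool.and_eq_true _ _ |>.mp hdom).1
  unfold Pre_stylize_text at hpre
  simp only [List.mem_cons, List.not_mem_nil, or_false] at hpre
  rcases hpre with h | h | h | h | h | h | h <;> subst h
  · exact pv_main (120764, 120211, 120205, none) (by decide) text.toList hd
  · exact pv_main (0, 120263, 120257, none) (by decide) text.toList hd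
  · exact pv_main (120764, 120315, 120309, none) (by decide) text.toList hd
  · exact pv_main (120734, 119743, 119737, none) (by decide) text.toList hd
  · exact pv_main (0, 119795, 119789, some ([104], [8462])) (by decide) text.toList hd
  · exact pv_main (120734, 119847, 119841, none) (by decide) text.toList hd
  · exact pv_main (120744, 120055, 120049,
      some ([67, 72, 78, 80, 81, 82, 90], [8450, 8461, 8469, 8473, 8474, 8477, 8484])) (by decide) text.toList hd
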